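-- pv_equiv track=rewrite | github.com/YeoJune/RDT | test.py | prepare_test_data
-- ===== SOURCE A (Python) =====
-- def prepare_test_data(num_samples: int = 100):
--     """Simple test data"""
--     sample_texts = [
--         "The quick brown fox jumps over the lazy dog in the forest.",
--         "Machine learning is a subset of artificial intelligence that focuses on data.",
--         "Natural language processing enables computers to understand human language.",
--         "Deep neural networks have revolutionized computer vision and speech recognition.",
--         "Transformer models use self-attention mechanisms for sequence processing.",
--         "Gradient descent is an optimization algorithm used in machine learning.",
--         "Convolutional neural networks are particularly effective for image tasks.",
--         "Recurrent neural networks can process sequential data like text and speech.",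
--         "Reinforcement learning agents learn through interaction with environments.",
--         "Transfer learning allows models to leverage knowledge from related tasks.",
--     ]
--
--     texts = []
--     while len(texts) < num_samples:
--         texts.extend(sample_texts)
--
--     return texts[:num_samples]
-- ===== SOURCE B (Python) =====
-- def prepare_test_data(num_samples: int = 100):
--     """Simple test data"""
--     sample_texts = [
--         "The quick brown fox jumps over the lazy dog in the forest.",
--         "Machine learning is a subset of artificial intelligence that focuses on data.",
--         "Natural language processing enables computers to understand human language.",
--         "Deep neural networks have revolutionized computer vision and speech recognition.",
--         "Transformer models use self-attention mechanisms for sequence processing.",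
--         "Gradient descent is an optimization algorithm used in machine learning.",
--         "Convolutional neural networks are particularly effective for image tasks.",
--         "Recurrent neural networks can process sequential data like text and speech.",
--         "Reinforcement learning agents learn through interaction with environments.",
--         "Transfer learning allows models to leverage knowledge from related tasks.",
--     ]
--     full, rest = divmod(max(num_samples, 0), len(sample_texts))
--     return sample_texts * full + sample_texts[:rest]
-- ===== Notes on version B (the rewrite author's own statement) =====
-- stated objective: simpler
-- what changed: Replaces the grow-until-long-enough loop plus final slice with a closed-form divmod construction: whole copies via list repetition plus a prefix of the remainder, so nothing is built and then discarded.
import Mathlib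
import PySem

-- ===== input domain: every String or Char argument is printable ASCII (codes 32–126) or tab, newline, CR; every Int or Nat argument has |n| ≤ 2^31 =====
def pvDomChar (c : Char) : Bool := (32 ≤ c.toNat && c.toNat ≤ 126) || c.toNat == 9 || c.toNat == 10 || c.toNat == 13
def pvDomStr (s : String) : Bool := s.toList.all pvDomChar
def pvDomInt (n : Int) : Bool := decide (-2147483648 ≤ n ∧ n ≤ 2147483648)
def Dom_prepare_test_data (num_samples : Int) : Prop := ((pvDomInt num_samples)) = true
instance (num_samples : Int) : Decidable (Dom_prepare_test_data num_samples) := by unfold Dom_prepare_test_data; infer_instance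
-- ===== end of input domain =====

-- B replaces A's grow-then-slice loop with a closed-form divmod construction (whole copies + prefix); simpler, same output.

-- the fixed sample_texts list, shared verbatim by both Pythons
def pvSampleTexts : List String := [
  "The quick brown fox jumps over the lazy dog in the forest.",
  "Machine learning is a subset of artificial intelligence that focuses on data.",
  "Natural language processing enables computers to understand human language.",
  "Deep neural networks have revolutionized computer vision and speech recognition.",
  "Transformer models use self-attention mechanisms for sequence processing.",
  "Gradient descent is an optimization algorithm used in machine learning.",
  "Convolutional neural networks are particularly effective for image tasks.",
  "Recurrent neural networks can process sequential data like text and speech.",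
  "Reinforcement learning agents learn through interaction with environments.",
  "Transfer learning allows models to leverage knowledge from related tasks."]

-- ===== PORT A =====
-- the 'while len(texts) < num_samples: texts.extend(sample_texts)' loop
def pvGrow (num_samples : Int) (texts : List String) : List String :=
  if (texts.length : Int) < num_samples then pvGrow num_samples (texts ++ pvSampleTexts)
  else texts
termination_by (num_samples - texts.length).toNat
decreasing_by simp [pvSampleTexts]; omega

def prepare_test_data (num_samples : Int) : List String :=
  PySem.List.slice (pvGrow num_samples []) none (some num_samples)

-- ===== PORT B =====
-- full, rest = divmod(max(num_samples, 0), 10); sample_texts * full + sample_texts[:rest]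
-- (divmod of the nonnegative max by 10 is Nat division; list repetition is replicate+flatten, the [:rest] prefix is take)
def prepare_test_data_alt (num_samples : Int) : List String :=
  let m : Nat := (max num_samples 0).toNat
  (List.replicate (m / pvSampleTexts.length) pvSampleTexts).flatten
    ++ pvSampleTexts.take (m % pvSampleTexts.length)

-- ===== PRECONDITION & SPEC =====
def Spec_prepare_test_data (num_samples : Int) (out : List String) : Prop := out = prepare_test_data_alt num_samples
instance (num_samples : Int) (out : List String) : Decidable (Spec_prepare_test_data num_samples out) := by unfold Spec_prepare_test_data; infer_instance

-- ===== CLAIM (what is proved, stated in full; the proofs are below) =====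
def Claim_equal_prepare_test_data : Prop := ∀ (num_samples : Int), Dom_prepare_test_data num_samples → Spec_prepare_test_data num_samples (prepare_test_data num_samples)

-- ===== LEMMAS AND PROOFS =====

-- concatenation of k copies of the sample list
def pvRep (k : Nat) : List String := (List.replicate k pvSampleTexts).flatten

theorem pvRep_succ (k : Nat) : pvRep (k + 1) = pvSampleTexts ++ pvRep k := by
  simp [pvRep, List.replicate_succ]

theorem pvRep_add (a b : Nat) : pvRep (a + b) = pvRep a ++ pvRep b := by
  unfold pvRep
  rw [List.replicate_add, List.flatten_append]

theorem pvRep_length (k : Nat) : (pvRep k).length = 10 * k := by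
  induction k with
  | zero => simp [pvRep]
  | succ k ih => rw [pvRep_succ]; simp [ih, pvSampleTexts]; ring

-- the grow loop returns some pvRep k of length ≥ num_samples
theorem pvGrow_spec (n : Int) : ∀ texts : List String,
    ∃ k, pvGrow n texts = texts ++ pvRep k ∧ n ≤ (texts ++ pvRep k).length := by
  intro texts
  rw [pvGrow]
  split
  · obtain ⟨k, hk, hlen⟩ := pvGrow_spec n (texts ++ pvSampleTexts)
    refine ⟨k + 1, ?_, ?_⟩
    · rw [hk, pvRep_succ, List.append_assoc]
    · rw [pvRep_succ] at *; simpa [List.append_assoc] using hlen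
  · exact ⟨0, by simp [pvRep], by simp [pvRep]; omega⟩
termination_by texts => (n - texts.length).toNat
decreasing_by simp [pvSampleTexts]; omega

-- taking n ≤ 10k elements of k copies = (n / 10) whole copies plus the first (n % 10) samples
theorem pvTake_rep (k n : Nat) (hn : n ≤ 10 * k) :
    (pvRep k).take n = pvRep (n / 10) ++ pvSampleTexts.take (n % 10) := by
  have hq : n / 10 ≤ k := by omega
  have hsplit : pvRep k = pvRep (n / 10) ++ pvRep (k - n / 10) := by
    rw [← pvRep_add]; congr 1; omega
  rw [hsplit, List.take_append, pvRep_length]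
  have h1 : 10 * (n / 10) ≤ n := by omega
  rw [List.take_of_length_le (by rw [pvRep_length]; omega)]
  congr 1
  have hr : n - 10 * (n / 10) = n % 10 := by omega
  rw [hr]
  by_cases h0 : n % 10 = 0
  · simp [h0]
  · have hk' : k - n / 10 ≠ 0 := by omega
    obtain ⟨k', hk'⟩ : ∃ k', k - n / 10 = k' + 1 := ⟨(k - n / 10) - 1, by omega⟩
    rw [hk', pvRep_succ, List.take_append]
    have : n % 10 - (pvSampleTexts : List String).length = 0 := by
      have : (pvSampleTexts : List String).length = 10 := by decide
      omega
    simp [this]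

-- ===== VERDICT (by name: the statement is the Claim_ definition above) =====
theorem prepare_test_data_spec : Claim_equal_prepare_test_data := by
  intro n _
  unfold Spec_prepare_test_data prepare_test_data prepare_test_data_alt
  have hlen10 : (pvSampleTexts : List String).length = 10 := by decide
  by_cases hn : 0 ≤ n
  · obtain ⟨k, hk, hl⟩ := pvGrow_spec n []
    simp only [List.nil_append] at hk hl
    rw [hk, PySem.List.slice_to _ hn]
    have hmax : max n 0 = n := by omega
    simp only [hmax, hlen10]
    exact pvTake_rep k n.toNat (by rw [pvRep_length] at hl; omega)
  · have hg : pvGrow n [] = [] := by rw [pvGrow]; simp; omega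
    have hmax : max n 0 = 0 := by omega
    rw [hg, hmax]
    simp [PySem.List.slice]
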